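-- pv_equiv track=rewrite | github.com/gbechtold/Velocitytree | velocitytree/workflow_conditions.py | _preprocess_condition
-- ===== SOURCE A (Python) =====
-- def _preprocess_condition(condition: str) -> str:
--     """Pre-process condition string for parsing."""
--     # Replace 'not in' with a temporary placeholder to avoid parsing issues
--     condition = condition.replace('not in', '__NOT_IN__')
--
--     # Replace logical operators with Python equivalents
--     replacements = {
--         '&&': ' and ',
--         '||': ' or ',
--         '!': ' not ',
--     }
--
--     for old, new in replacements.items():
--         condition = condition.replace(old, new)
--
--     # Replace the placeholder back
--     condition = condition.replace('__NOT_IN__', 'not in')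
--
--     return condition
-- ===== SOURCE B (Python) =====
-- import re
--
-- _PATTERN = re.compile(r'not in|&&|\|\||!')
-- _MAPPING = {
--     'not in': 'not in',
--     '&&': ' and ',
--     '||': ' or ',
--     '!': ' not ',
-- }
--
-- def _preprocess_condition(condition: str) -> str:
--     """Pre-process condition string for parsing (single-pass rewrite)."""
--     return _PATTERN.sub(lambda m: _MAPPING[m.group()], condition)
-- ===== Notes on version B (the rewrite author's own statement) =====
-- stated objective: idiomatic
-- what changed: Replaced the five sequential full-string str.replace passes (which insert a temporary '__NOT_IN__' placeholder and later replace it back) by a single left-to-right re.sub pass over an alternation of the four real tokens with a mapping dict; Pre_ excludes inputs that literally contain A's internal sentinel fragment '__NOT_IN', a corner where the placeholder round-trip itself determines A's output and either behaviour is defensible.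
-- outside the precondition, e.g. on _preprocess_condition('__NOT_IN__'): A returns 'not in', B returns '__NOT_IN__'; on _preprocess_condition('__NOT_INnot in'): A returns 'not inNOT_IN__', B returns '__NOT_INnot in'; on _preprocess_condition('__NOT_IN'): A returns '__NOT_IN', B returns '__NOT_IN'
import Mathlib
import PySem

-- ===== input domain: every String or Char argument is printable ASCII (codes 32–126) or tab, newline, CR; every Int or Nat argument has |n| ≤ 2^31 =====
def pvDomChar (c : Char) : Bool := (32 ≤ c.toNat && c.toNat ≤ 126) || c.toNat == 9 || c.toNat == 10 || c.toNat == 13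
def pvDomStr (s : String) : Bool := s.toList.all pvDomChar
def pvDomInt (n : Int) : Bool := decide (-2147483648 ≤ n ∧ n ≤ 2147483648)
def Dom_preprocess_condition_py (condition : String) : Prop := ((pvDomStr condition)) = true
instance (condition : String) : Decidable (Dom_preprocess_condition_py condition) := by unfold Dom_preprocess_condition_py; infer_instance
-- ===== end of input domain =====

-- B replaces A's five sequential str.replace passes (via a '__NOT_IN__' placeholder) by one
-- left-to-right scan rewriting the four operator tokens in place (idiomatic re.sub); Pre_
-- excludes inputs that literally contain A's internal sentinel fragment '__NOT_IN'.

-- ===== PORT A =====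
def preprocess_condition_py (condition : String) : String :=
  -- condition = condition.replace('not in', '__NOT_IN__')
  let c1 := PySem.Str.replace condition "not in" "__NOT_IN__"
  -- for old, new in replacements.items(): condition = condition.replace(old, new)
  let c2 := ([("&&", " and "), ("||", " or "), ("!", " not ")] : List (String × String)).foldl
      (fun c p => PySem.Str.replace c p.1 p.2) c1
  -- condition = condition.replace('__NOT_IN__', 'not in')
  PySem.Str.replace c2 "__NOT_IN__" "not in"

-- ===== PORT B =====
-- B is a single re.sub pass over the alternation 'not in|&&|\|\||!': at each position the
-- first alternative that matches is rewritten via the mapping dict, otherwise the character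
-- is copied; this scan is transcribed literally (re.sub's leftmost scan, alternatives tried
-- in pattern order — exact for these fixed literal alternatives).
def scanB : List Char → List Char
  | 'n'::'o'::'t'::' '::'i'::'n':: t => 'n'::'o'::'t'::' '::'i'::'n':: scanB t
  | '&'::'&':: t => ' '::'a'::'n'::'d'::' ':: scanB t
  | '|'::'|':: t => ' '::'o'::'r'::' ':: scanB t
  | '!':: t => ' '::'n'::'o'::'t'::' ':: scanB t
  | c :: t => c :: scanB t
  | [] => []

def preprocess_condition_py_alt (condition : String) : String :=
  String.ofList (scanB condition.toList)

-- ===== PRECONDITION & SPEC =====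
-- Pre_ excludes inputs that literally contain '__NOT_IN', a fragment of A's internal
-- placeholder: there the placeholder round-trip itself determines A's output (the caller's
-- text can be rewritten or merge with an inserted placeholder), a corner no caller would
-- specify and where either behaviour is defensible.
def Pre_preprocess_condition_py (condition : String) : Prop :=
  PySem.Str.isIn "__NOT_IN" condition = false
instance (condition : String) : Decidable (Pre_preprocess_condition_py condition) := by
  unfold Pre_preprocess_condition_py; infer_instance

def pvWitness_preprocess_condition_py : String := "a && b || !(x not in ys)"

def Spec_preprocess_condition_py (condition : String) (out : String) : Prop :=
  out = preprocess_condition_py_alt condition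
instance (condition : String) (out : String) : Decidable (Spec_preprocess_condition_py condition out) := by
  unfold Spec_preprocess_condition_py; infer_instance

-- ===== CLAIM (what is proved, stated in full; the proofs are below) =====
def Claim_equal_preprocess_condition_py : Prop := ∀ (condition : String), Dom_preprocess_condition_py condition → Pre_preprocess_condition_py condition → Spec_preprocess_condition_py condition (preprocess_condition_py condition)

-- ===== LEMMAS AND PROOFS =====

-- token lists used by the proofs
def pNI : List Char := ['n','o','t',' ','i','n']
def pPH : List Char := ['_','_','N','O','T','_','I','N','_','_']
def pAmp : List Char := ['&','&']
def pBar : List Char := ['|','|']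
def rAnd : List Char := [' ','a','n','d',' ']
def rOr : List Char := [' ','o','r',' ']
def rNot : List Char := [' ','n','o','t',' ']
def bad0 : List Char := ['_','_','N','O','T','_','I','N']

-- fuel-free characterisation of PySem.Chars.replace (leftmost, non-overlapping)
def repl (old new : List Char) : List Char → List Char
  | [] => []
  | c :: t =>
    if old.isPrefixOf (c :: t) then new ++ repl old new (List.drop (old.length - 1) t)
    else c :: repl old new t
termination_by l => l.length
decreasing_by all_goals (simp [List.length_drop]; try omega)

lemma go_eq (old new : List Char) (hold : old ≠ []) :
    ∀ (fuel : Nat) (l acc : List Char), l.length ≤ fuel →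
      PySem.Chars.replace.go old new fuel l acc = acc.reverse ++ repl old new l := by
  intro fuel
  induction fuel with
  | zero =>
    intro l acc hl
    have : l = [] := List.eq_nil_of_length_eq_zero (Nat.le_zero.mp hl)
    subst this
    simp [PySem.Chars.replace.go, repl]
  | succ n IH =>
    intro l acc hl
    cases l with
    | nil => simp [PySem.Chars.replace.go, repl]
    | cons c t =>
      rw [PySem.Chars.replace.go]
      by_cases hp : old.isPrefixOf (c :: t) = true
      · rw [if_pos hp]
        have hdrop : List.drop old.length (c :: t) = List.drop (old.length - 1) t := by
          cases old with
          | nil => exact absurd rfl hold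
          | cons a pr => simp
        rw [hdrop, IH _ _ (le_trans (by simp [List.length_drop]) (Nat.le_of_succ_le_succ hl))]
        rw [repl]
        simp [hp]
      · rw [if_neg hp]
        rw [IH _ _ (Nat.le_of_succ_le_succ hl)]
        rw [repl]
        simp [hp]

lemma replace_eq_repl (s old new : List Char) (h : old ≠ []) :
    PySem.Chars.replace s old new = repl old new s := by
  rw [PySem.Chars.replace, if_neg (by simpa [List.isEmpty_iff] using h)]
  simpa using go_eq old new h s.length s [] le_rfl

lemma repl_nil (old new : List Char) : repl old new [] = [] := by simp [repl]

lemma repl_skip (old new : List Char) (c : Char) (t : List Char)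
    (h : old.isPrefixOf (c :: t) = false) :
    repl old new (c :: t) = c :: repl old new t := by
  rw [repl]; simp [h]

lemma repl_match (old new x : List Char) (h : old ≠ []) :
    repl old new (old ++ x) = new ++ repl old new x := by
  cases old with
  | nil => exact absurd rfl h
  | cons a pr =>
    rw [List.cons_append, repl]
    have hp : (a :: pr).isPrefixOf (a :: (pr ++ x)) = true := by
      simp [List.isPrefixOf_iff_prefix]
    simp only [hp, if_pos]
    simp

lemma repl_block (a : Char) (pr new : List Char) :
    ∀ (B x : List Char), a ∉ B →
      repl (a :: pr) new (B ++ x) = B ++ repl (a :: pr) new x := by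
  intro B
  induction B with
  | nil => simp
  | cons b B' IH =>
    intro x hB
    have hab : (a == b) = false := by
      simp only [beq_eq_false_iff_ne]
      intro hh; exact hB (by simp [hh])
    rw [List.cons_append, repl_skip _ _ _ _ (by simp [List.isPrefixOf, hab])]
    rw [IH x (fun hm => hB (List.mem_cons_of_mem _ hm))]
    simp

lemma repl_head (old new : List Char) (hnew : new ≠ []) (t : List Char) (c : Char)
    (h : (repl old new t).head? = some c) :
    new.head? = some c ∨ t.head? = some c := by
  cases t with
  | nil => rw [repl_nil] at h; simp at h
  | cons d u =>
    rw [repl] at h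
    by_cases hp : old.isPrefixOf (d :: u) = true
    · left
      cases new with
      | nil => exact absurd rfl hnew
      | cons n0 nr => simpa [hp] using h
    · right
      simp only [Bool.not_eq_true] at hp
      simp [hp] at h
      simpa using h.symm ▸ rfl

-- the composed first four replaces of A
def chain4 (t : List Char) : List Char :=
  repl ['!'] rNot (repl pBar rOr (repl pAmp rAnd (repl pNI pPH t)))

lemma blk1 (B x : List Char) (h : 'n' ∉ B) : repl pNI pPH (B ++ x) = B ++ repl pNI pPH x :=
  repl_block _ _ _ B x h
lemma blk2 (B x : List Char) (h : '&' ∉ B) : repl pAmp rAnd (B ++ x) = B ++ repl pAmp rAnd x :=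
  repl_block _ _ _ B x h
lemma blk3 (B x : List Char) (h : '|' ∉ B) : repl pBar rOr (B ++ x) = B ++ repl pBar rOr x :=
  repl_block _ _ _ B x h
lemma blk4 (B x : List Char) (h : '!' ∉ B) : repl ['!'] rNot (B ++ x) = B ++ repl ['!'] rNot x :=
  repl_block _ _ _ B x h

lemma chain4_nil : chain4 [] = [] := by
  simp [chain4, repl_nil]

lemma chain4_NI (u : List Char) : chain4 (pNI ++ u) = pPH ++ chain4 u := by
  unfold chain4
  rw [repl_match pNI pPH u (by decide), blk2 pPH _ (by decide), blk3 pPH _ (by decide),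
    blk4 pPH _ (by decide)]

lemma chain4_amp (u : List Char) : chain4 ('&' :: '&' :: u) = rAnd ++ chain4 u := by
  unfold chain4
  have h1 : repl pNI pPH ('&' :: '&' :: u) = '&' :: '&' :: repl pNI pPH u :=
    blk1 ['&', '&'] u (by decide)
  have h2 : repl pAmp rAnd ('&' :: '&' :: repl pNI pPH u) = rAnd ++ repl pAmp rAnd (repl pNI pPH u) :=
    repl_match pAmp rAnd (repl pNI pPH u) (by decide)
  rw [h1, h2, blk3 rAnd _ (by decide), blk4 rAnd _ (by decide)]

lemma chain4_bar (u : List Char) : chain4 ('|' :: '|' :: u) = rOr ++ chain4 u := by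
  unfold chain4
  have h1 : repl pNI pPH ('|' :: '|' :: u) = '|' :: '|' :: repl pNI pPH u :=
    blk1 ['|', '|'] u (by decide)
  have h2 : repl pAmp rAnd ('|' :: '|' :: repl pNI pPH u) = '|' :: '|' :: repl pAmp rAnd (repl pNI pPH u) :=
    blk2 ['|', '|'] _ (by decide)
  have h3 : repl pBar rOr ('|' :: '|' :: repl pAmp rAnd (repl pNI pPH u)) =
      rOr ++ repl pBar rOr (repl pAmp rAnd (repl pNI pPH u)) :=
    repl_match pBar rOr _ (by decide)
  rw [h1, h2, h3, blk4 rOr _ (by decide)]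

lemma chain4_bang (u : List Char) : chain4 ('!' :: u) = rNot ++ chain4 u := by
  unfold chain4
  have h1 : repl pNI pPH ('!' :: u) = '!' :: repl pNI pPH u := blk1 ['!'] u (by decide)
  have h2 : repl pAmp rAnd ('!' :: repl pNI pPH u) = '!' :: repl pAmp rAnd (repl pNI pPH u) :=
    blk2 ['!'] _ (by decide)
  have h3 : repl pBar rOr ('!' :: repl pAmp rAnd (repl pNI pPH u)) =
      '!' :: repl pBar rOr (repl pAmp rAnd (repl pNI pPH u)) :=
    blk3 ['!'] _ (by decide)
  have h4 : repl ['!'] rNot ('!' :: repl pBar rOr (repl pAmp rAnd (repl pNI pPH u))) =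
      rNot ++ repl ['!'] rNot (repl pBar rOr (repl pAmp rAnd (repl pNI pPH u))) :=
    repl_match ['!'] rNot _ (by decide)
  rw [h1, h2, h3, h4]

lemma isPrefixOf2_true {a b d : Char} {y : List Char}
    (h : ([a, b]).isPrefixOf (d :: y) = true) : d = a ∧ y.head? = some b := by
  cases y with
  | nil => simp [List.isPrefixOf] at h
  | cons e y' =>
    simp [List.isPrefixOf] at h
    exact ⟨h.1.symm, by simp [h.2]⟩

lemma chain4_gen (d : Char) (u : List Char)
    (h1 : pNI.isPrefixOf (d :: u) = false)
    (h2 : pAmp.isPrefixOf (d :: u) = false)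
    (h3 : pBar.isPrefixOf (d :: u) = false)
    (h4 : d ≠ '!') :
    chain4 (d :: u) = d :: chain4 u := by
  unfold chain4
  rw [repl_skip _ _ _ _ h1]
  have hA : pAmp.isPrefixOf (d :: repl pNI pPH u) = false := by
    by_contra hc
    rw [Bool.not_eq_false] at hc
    obtain ⟨hd, hh⟩ := isPrefixOf2_true hc
    rcases repl_head pNI pPH (by decide) u '&' hh with h | h
    · simp [pPH] at h
    · cases u with
      | nil => simp at h
      | cons e u' =>
        simp at h
        rw [hd, h] at h2
        simp [pAmp, List.isPrefixOf] at h2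
  rw [repl_skip _ _ _ _ hA]
  have hB : pBar.isPrefixOf (d :: repl pAmp rAnd (repl pNI pPH u)) = false := by
    by_contra hc
    rw [Bool.not_eq_false] at hc
    obtain ⟨hd, hh⟩ := isPrefixOf2_true hc
    rcases repl_head pAmp rAnd (by decide) _ '|' hh with h | h
    · simp [rAnd] at h
    · rcases repl_head pNI pPH (by decide) u '|' h with h' | h'
      · simp [pPH] at h'
      · cases u with
        | nil => simp at h'
        | cons e u' =>
          simp at h'
          rw [hd, h'] at h3
          simp [pBar, List.isPrefixOf] at h3
  rw [repl_skip _ _ _ _ hB]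
  have hC : (['!']).isPrefixOf (d :: repl pBar rOr (repl pAmp rAnd (repl pNI pPH u))) = false := by
    simp [List.isPrefixOf]
    exact fun hh => absurd hh.symm h4
  rw [repl_skip _ _ _ _ hC]

lemma chain4_pref : ∀ (n : Nat) (t : List Char), t.length ≤ n → ∀ k : Nat, 1 ≤ k → k ≤ 9 →
    (pPH.drop k) <+: chain4 t →
    (pPH.drop k) <+: t ∨ ((pPH.drop k).take (8 - k) ++ pNI) <+: t ∨
      ((pPH.drop k).take (9 - k) ++ pNI) <+: t := by
  intro n
  induction n with
  | zero =>
    intro t ht k hk1 hk9 hpre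
    have ht0 : t = [] := List.eq_nil_of_length_eq_zero (Nat.le_zero.mp ht)
    subst ht0
    rw [chain4_nil] at hpre
    have h0 := List.prefix_nil.mp hpre
    have hlen := congrArg List.length h0
    simp [pPH] at hlen
    omega
  | succ n IH =>
    intro t ht k hk1 hk9 hpre
    cases t with
    | nil =>
      rw [chain4_nil] at hpre
      have h0 := List.prefix_nil.mp hpre
      have hlen := congrArg List.length h0
      simp [pPH] at hlen
      omega
    | cons d u =>
      have hlen : u.length ≤ n := by simp at ht; omega
      by_cases hNI : pNI.isPrefixOf (d :: u) = true
      · obtain ⟨v, hv⟩ := List.isPrefixOf_iff_prefix.mp hNI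
        rw [← hv, chain4_NI] at hpre
        rw [← hv]
        interval_cases k
        · exfalso; simp [pPH, List.cons_prefix_cons] at hpre
        · exfalso; simp [pPH, List.cons_prefix_cons] at hpre
        · exfalso; simp [pPH, List.cons_prefix_cons] at hpre
        · exfalso; simp [pPH, List.cons_prefix_cons] at hpre
        · exfalso; simp [pPH, List.cons_prefix_cons] at hpre
        · exfalso; simp [pPH, List.cons_prefix_cons] at hpre
        · exfalso; simp [pPH, List.cons_prefix_cons] at hpre
        · exact Or.inr (Or.inl (by simp [pPH, pNI]))
        · exact Or.inr (Or.inl (by simp [pPH, pNI]))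
      · by_cases hAmp : pAmp.isPrefixOf (d :: u) = true
        · exfalso
          obtain ⟨v, hv⟩ := List.isPrefixOf_iff_prefix.mp hAmp
          rw [← hv] at hpre
          rw [show pAmp ++ v = '&' :: '&' :: v from rfl, chain4_amp] at hpre
          interval_cases k <;> simp [pPH, rAnd, List.cons_prefix_cons] at hpre
        · by_cases hBar : pBar.isPrefixOf (d :: u) = true
          · exfalso
            obtain ⟨v, hv⟩ := List.isPrefixOf_iff_prefix.mp hBar
            rw [← hv] at hpre
            rw [show pBar ++ v = '|' :: '|' :: v from rfl, chain4_bar] at hpre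
            interval_cases k <;> simp [pPH, rOr, List.cons_prefix_cons] at hpre
          · by_cases hBang : d = '!'
            · exfalso
              subst hBang
              rw [chain4_bang] at hpre
              interval_cases k <;> simp [pPH, rNot, List.cons_prefix_cons] at hpre
            · have hNIf : pNI.isPrefixOf (d :: u) = false := Bool.not_eq_true _ ▸ hNI
              have hAmpf : pAmp.isPrefixOf (d :: u) = false := Bool.not_eq_true _ ▸ hAmp
              have hBarf : pBar.isPrefixOf (d :: u) = false := Bool.not_eq_true _ ▸ hBar
              rw [chain4_gen d u hNIf hAmpf hBarf hBang] at hpre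
              have hk10 : k < pPH.length := by simp [pPH]; omega
              rw [List.drop_eq_getElem_cons hk10] at hpre
              obtain ⟨hd, h'⟩ := List.cons_prefix_cons.mp hpre
              by_cases hk9' : k = 9
              · subst hk9'
                exact Or.inl (by
                  rw [List.drop_eq_getElem_cons hk10]
                  exact List.cons_prefix_cons.mpr ⟨hd, by
                    rw [show pPH.drop 10 = [] from rfl]; exact List.nil_prefix⟩)
              · rcases IH u hlen (k + 1) (by omega) (by omega) h' with h | h | h
                · exact Or.inl (by
                    rw [List.drop_eq_getElem_cons hk10]
                    exact List.cons_prefix_cons.mpr ⟨hd, h⟩)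
                · by_cases hk8' : k = 8
                  · subst hk8'
                    simp [pPH] at h
                    refine Or.inr (Or.inr ?_)
                    rw [show (pPH.drop 8).take (9 - 8) ++ pNI = '_' :: pNI from rfl]
                    exact List.cons_prefix_cons.mpr ⟨hd, by simpa [pNI] using h⟩
                  · refine Or.inr (Or.inl ?_)
                    rw [List.drop_eq_getElem_cons hk10,
                      show 8 - k = (8 - (k + 1)) + 1 by omega, List.take_succ_cons,
                      List.cons_append]
                    exact List.cons_prefix_cons.mpr ⟨hd, h⟩
                · refine Or.inr (Or.inr ?_)
                  rw [List.drop_eq_getElem_cons hk10,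
                    show 9 - k = (9 - (k + 1)) + 1 by omega, List.take_succ_cons,
                    List.cons_append]
                  exact List.cons_prefix_cons.mpr ⟨hd, h⟩

lemma scanB_nil : scanB [] = [] := by simp [scanB]

lemma scanB_NI (u : List Char) : scanB (pNI ++ u) = pNI ++ scanB u := by
  simp [pNI, scanB]

lemma scanB_amp (u : List Char) : scanB ('&' :: '&' :: u) = rAnd ++ scanB u := by
  simp [rAnd, scanB]

lemma scanB_bar (u : List Char) : scanB ('|' :: '|' :: u) = rOr ++ scanB u := by
  simp [rOr, scanB]

lemma scanB_bang (u : List Char) : scanB ('!' :: u) = rNot ++ scanB u := by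
  simp [rNot, scanB]

lemma scanB_gen (d : Char) (u : List Char)
    (h1 : pNI.isPrefixOf (d :: u) = false)
    (h3 : pAmp.isPrefixOf (d :: u) = false)
    (h4 : pBar.isPrefixOf (d :: u) = false)
    (h5 : d ≠ '!') :
    scanB (d :: u) = d :: scanB u := by
  rw [scanB.eq_def]
  split
  · next t heq =>
    obtain ⟨hd, hu⟩ := List.cons.inj heq
    subst hd; subst hu
    simp [pNI, List.isPrefixOf] at h1
  · next t heq =>
    obtain ⟨hd, hu⟩ := List.cons.inj heq
    subst hd; subst hu
    simp [pAmp, List.isPrefixOf] at h3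
  · next t heq =>
    obtain ⟨hd, hu⟩ := List.cons.inj heq
    subst hd; subst hu
    simp [pBar, List.isPrefixOf] at h4
  · next t heq =>
    obtain ⟨hd, hu⟩ := List.cons.inj heq
    exact absurd hd h5
  · next c t hn1 hn2 hn3 hn4 heq =>
    obtain ⟨hd, hu⟩ := List.cons.inj heq
    subst hd; subst hu
    rfl
  · next heq => exact absurd heq (by simp)

lemma blk5 (B x : List Char) (h : '_' ∉ B) : repl pPH pNI (B ++ x) = B ++ repl pPH pNI x :=
  repl_block _ _ _ B x h

lemma bad0_of_pPH {l : List Char} (h : pPH <+: l) : bad0 <+: l :=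
  List.IsPrefix.trans (by decide) h

lemma main_eq : ∀ (n : Nat) (t : List Char), t.length ≤ n →
    ¬ (bad0 <:+: t) →
    repl pPH pNI (chain4 t) = scanB t := by
  intro n
  induction n with
  | zero =>
    intro t ht _
    have ht0 : t = [] := List.eq_nil_of_length_eq_zero (Nat.le_zero.mp ht)
    subst ht0
    rw [chain4_nil, repl_nil, scanB_nil]
  | succ n IH =>
    intro t ht nb0
    cases t with
    | nil => rw [chain4_nil, repl_nil, scanB_nil]
    | cons d u =>
      have hlen : u.length ≤ n := by simp at ht; omega
      have nb0u : ¬ (bad0 <:+: u) := fun h => nb0 (h.trans (List.suffix_cons d u).isInfix)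
      by_cases hNI : pNI.isPrefixOf (d :: u) = true
      · obtain ⟨v, hv⟩ := List.isPrefixOf_iff_prefix.mp hNI
        rw [← hv, chain4_NI, repl_match pPH pNI _ (by decide), scanB_NI]
        have hvlen : v.length ≤ n := by
          have := congrArg List.length hv
          simp [pNI] at this
          simp at ht
          omega
        have hsuf : v <:+ d :: u := hv ▸ List.suffix_append pNI v
        rw [IH v hvlen (fun h => nb0 (h.trans hsuf.isInfix))]
      · by_cases hPH : pPH.isPrefixOf (d :: u) = true
        · exfalso
          exact nb0 (bad0_of_pPH (List.isPrefixOf_iff_prefix.mp hPH)).isInfix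
        · by_cases hAmp : pAmp.isPrefixOf (d :: u) = true
          · obtain ⟨v, hv⟩ := List.isPrefixOf_iff_prefix.mp hAmp
            rw [← hv, show pAmp ++ v = '&' :: '&' :: v from rfl, chain4_amp,
              blk5 rAnd _ (by decide), scanB_amp]
            have hvlen : v.length ≤ n := by
              have := congrArg List.length hv
              simp [pAmp] at this
              simp at ht
              omega
            have hsuf : v <:+ d :: u := hv ▸ List.suffix_append pAmp v
            rw [IH v hvlen (fun h => nb0 (h.trans hsuf.isInfix))]
          · by_cases hBar : pBar.isPrefixOf (d :: u) = true
            · obtain ⟨v, hv⟩ := List.isPrefixOf_iff_prefix.mp hBar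
              rw [← hv, show pBar ++ v = '|' :: '|' :: v from rfl, chain4_bar,
                blk5 rOr _ (by decide), scanB_bar]
              have hvlen : v.length ≤ n := by
                have := congrArg List.length hv
                simp [pBar] at this
                simp at ht
                omega
              have hsuf : v <:+ d :: u := hv ▸ List.suffix_append pBar v
              rw [IH v hvlen (fun h => nb0 (h.trans hsuf.isInfix))]
            · by_cases hBang : d = '!'
              · subst hBang
                rw [chain4_bang, blk5 rNot _ (by decide), scanB_bang, IH u hlen nb0u]
              · have hNIf : pNI.isPrefixOf (d :: u) = false := Bool.not_eq_true _ ▸ hNI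
                have hPHf : pPH.isPrefixOf (d :: u) = false := Bool.not_eq_true _ ▸ hPH
                have hAmpf : pAmp.isPrefixOf (d :: u) = false := Bool.not_eq_true _ ▸ hAmp
                have hBarf : pBar.isPrefixOf (d :: u) = false := Bool.not_eq_true _ ▸ hBar
                rw [chain4_gen d u hNIf hAmpf hBarf hBang]
                have hskip : pPH.isPrefixOf (d :: chain4 u) = false := by
                  by_contra hc
                  rw [Bool.not_eq_false] at hc
                  obtain ⟨y, hy⟩ := List.isPrefixOf_iff_prefix.mp hc
                  have hy' : '_' :: (pPH.drop 1 ++ y) = d :: chain4 u := hy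
                  obtain ⟨hd, hy2⟩ := List.cons.inj hy'
                  have hpre : pPH.drop 1 <+: chain4 u := ⟨y, hy2⟩
                  rcases chain4_pref n u hlen 1 (by omega) (by omega) hpre with h | h | h
                  · apply nb0
                    have hb : pPH <+: d :: u := by
                      rw [show pPH = '_' :: pPH.drop 1 from rfl]
                      exact List.cons_prefix_cons.mpr ⟨hd, h⟩
                    exact (bad0_of_pPH hb).isInfix
                  · apply nb0
                    have hb : '_' :: ((pPH.drop 1).take (8 - 1) ++ pNI) <+: d :: u :=
                      List.cons_prefix_cons.mpr ⟨hd, h⟩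
                    exact ((List.IsPrefix.trans (show bad0 <+: '_' :: ((pPH.drop 1).take (8 - 1) ++ pNI) from by decide) hb)).isInfix
                  · apply nb0
                    have hb : '_' :: ((pPH.drop 1).take (9 - 1) ++ pNI) <+: d :: u :=
                      List.cons_prefix_cons.mpr ⟨hd, h⟩
                    exact ((List.IsPrefix.trans (show bad0 <+: '_' :: ((pPH.drop 1).take (9 - 1) ++ pNI) from by decide) hb)).isInfix
                rw [repl_skip _ _ _ _ hskip, scanB_gen d u hNIf hAmpf hBarf hBang,
                  IH u hlen nb0u]

-- ===== VERDICT (by name: the statement is the Claim_ definition above) =====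
theorem preprocess_condition_py_spec : Claim_equal_preprocess_condition_py := by
  unfold Claim_equal_preprocess_condition_py
  intro cond _hdom hpre
  unfold Spec_preprocess_condition_py
  have nb0 : ¬ (bad0 <:+: cond.toList) := by
    intro h
    have := (PySem.Str.isIn_iff_infix "__NOT_IN" cond).mpr (by
      rw [show ("__NOT_IN" : String).toList = bad0 from by decide]; exact h)
    rw [hpre] at this
    exact Bool.false_ne_true this
  unfold preprocess_condition_py preprocess_condition_py_alt
  simp only [List.foldl_cons, List.foldl_nil]
  rw [show ∀ s o nn : String, PySem.Str.replace s o nn =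
      String.ofList (PySem.Chars.replace s.toList o.toList nn.toList) from fun _ _ _ => rfl]
  refine congrArg String.ofList ?_
  simp only [PySem.Str.toList_replace]
  rw [show ("not in" : String).toList = pNI from by decide,
    show ("__NOT_IN__" : String).toList = pPH from by decide,
    show ("&&" : String).toList = pAmp from by decide,
    show (" and " : String).toList = rAnd from by decide,
    show ("||" : String).toList = pBar from by decide,
    show (" or " : String).toList = rOr from by decide,
    show ("!" : String).toList = ['!'] from by decide,
    show (" not " : String).toList = rNot from by decide]
  rw [replace_eq_repl _ pNI pPH (by decide), replace_eq_repl _ pAmp rAnd (by decide),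
    replace_eq_repl _ pBar rOr (by decide), replace_eq_repl _ ['!'] rNot (by decide),
    replace_eq_repl _ pPH pNI (by decide)]
  exact main_eq cond.toList.length cond.toList le_rfl nb0
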